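-- pv_equiv track=rewrite | github.com/SferrellaA/twitch-analysis | videoStats.py | commentCountDistribution
-- ===== SOURCE A (Python) =====
-- from _collections import OrderedDict
--
-- def commentCountDistribution(streamComments):
-- 	commentCount = OrderedDict()
-- 	for user in streamComments:
-- 		count = len(streamComments[user])
-- 		if count not in commentCount:
-- 			commentCount[count] = []
-- 		commentCount[count].append(user)
-- 	commentDistribution = {}
-- 	for count in sorted(commentCount.keys()):
-- 		commentDistribution[count] = len(commentCount[count])
-- 	return commentDistribution
-- ===== SOURCE B (Python) =====
-- def commentCountDistribution(streamComments):
-- 	# sort the per-user comment counts, then collapse equal runs into count -> frequency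
-- 	counts = sorted(len(comments) for comments in streamComments.values())
-- 	dist = {}
-- 	rest = counts
-- 	while rest:
-- 		x = rest[0]
-- 		run = 1
-- 		while run < len(rest) and rest[run] == x:
-- 			run += 1
-- 		dist[x] = run
-- 		rest = rest[run:]
-- 	return dist
-- ===== Notes on version B (the rewrite author's own statement) =====
-- stated objective: alternative
-- what changed: Replaces A's 'group users into per-count lists in a dict, then walk sorted keys' with 'sort the count values themselves, then collapse consecutive equal runs into count->frequency'.
import Mathlib
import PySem

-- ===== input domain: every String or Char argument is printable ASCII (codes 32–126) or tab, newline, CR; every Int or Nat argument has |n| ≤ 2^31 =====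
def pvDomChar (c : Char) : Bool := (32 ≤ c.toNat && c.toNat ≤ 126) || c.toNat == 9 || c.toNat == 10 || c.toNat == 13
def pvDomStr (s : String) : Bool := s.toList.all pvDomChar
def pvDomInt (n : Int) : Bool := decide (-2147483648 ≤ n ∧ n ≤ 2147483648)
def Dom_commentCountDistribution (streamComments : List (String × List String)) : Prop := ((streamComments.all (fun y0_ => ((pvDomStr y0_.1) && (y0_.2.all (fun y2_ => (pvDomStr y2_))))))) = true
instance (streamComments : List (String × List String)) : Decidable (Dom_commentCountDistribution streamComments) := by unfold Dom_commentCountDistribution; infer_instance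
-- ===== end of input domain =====

-- B sorts the per-user comment counts and collapses consecutive equal runs into count -> frequency,
-- instead of A's dict grouping users by count followed by a walk over the sorted keys (objective: alternative).


-- ===== PORT A =====
def commentCountDistribution (streamComments : List (String × List String)) : List (Int × Int) :=
  -- for user in streamComments: group users by len(streamComments[user])
  let commentCount : PySem.Dict Int (List String) :=
    streamComments.foldl (fun cc user =>
      -- count = len(streamComments[user]); dict lookup = first match.  The lookup always
      -- succeeds (user.1 is a key of the dict itself), so getD [] is exact here.
      let count : Int := ((((PySem.Dict.mk streamComments).get? user.1).getD []).length : Int)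
      -- if count not in commentCount: commentCount[count] = []
      let cc := if cc.contains count = false then cc.insert count [] else cc
      -- commentCount[count].append(user)   (key is present, so modify with default [] is exact)
      cc.modify count [] (fun l => l ++ [user.1]))
      PySem.Dict.empty
  -- for count in sorted(commentCount.keys()): commentDistribution[count] = len(commentCount[count])
  let commentDistribution : PySem.Dict Int Int :=
    (PySem.List.sorted commentCount.keys (fun x => x) false).foldl
      (fun cd count => cd.insert count ((commentCount.getD count []).length : Int))
      PySem.Dict.empty
  commentDistribution.items

-- ===== PORT B =====
-- the outer 'while rest:' loop of Source B: take the head's run (the inner while = 1 + run in the tail),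
-- emit (value, run length) and continue on the remainder 'rest[run:]'
def ccdRunLengths : List Int → List (Int × Int)
  | [] => []
  | x :: xs =>
      (x, ((xs.takeWhile (· == x)).length : Int) + 1) :: ccdRunLengths (xs.dropWhile (· == x))
termination_by s => s.length
decreasing_by
  simpa [Nat.lt_succ_iff] using List.length_dropWhile_le (· == x) xs

def commentCountDistribution_alt (streamComments : List (String × List String)) : List (Int × Int) :=
  -- counts = sorted(len(comments) for comments in streamComments.values())
  ccdRunLengths
    (PySem.List.sorted (streamComments.map (fun kv => (kv.2.length : Int))) (fun x => x) false)

-- ===== PRECONDITION & SPEC =====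
-- Pre_ excludes association lists with a duplicated user key: those do not represent a Python dict
-- (dict keys are unique), so A, whose parameter is a dict, is never called on them.
def Pre_commentCountDistribution (streamComments : List (String × List String)) : Prop :=
  (streamComments.map Prod.fst).Nodup
instance (streamComments : List (String × List String)) : Decidable (Pre_commentCountDistribution streamComments) := by unfold Pre_commentCountDistribution; infer_instance

def pvWitness_commentCountDistribution : (List (String × List String)) :=
  [("alice", ["hi", "lol"]), ("bob", []), ("carol", ["gg", "wp"])]

def Spec_commentCountDistribution (streamComments : List (String × List String)) (out : List (Int × Int)) : Prop := out = commentCountDistribution_alt streamComments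
instance (streamComments : List (String × List String)) (out : List (Int × Int)) : Decidable (Spec_commentCountDistribution streamComments out) := by unfold Spec_commentCountDistribution; infer_instance

-- ===== CLAIM (what is proved, stated in full; the proofs are below) =====
def Claim_equal_commentCountDistribution : Prop := ∀ (streamComments : List (String × List String)), Dom_commentCountDistribution streamComments → Pre_commentCountDistribution streamComments → Spec_commentCountDistribution streamComments (commentCountDistribution streamComments)

-- ===== LEMMAS AND PROOFS =====

-- A's "ensure key, then append" step is a single modify
theorem ccdStepCollapse (cc : PySem.Dict Int (List String)) (c : Int) (u : String) :
    (if cc.contains c = false then cc.insert c [] else cc).modify c [] (· ++ [u])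
      = cc.modify c [] (· ++ [u]) := by
  by_cases h : cc.contains c = true
  · simp [h]
  · simp only [eq_false_of_ne_true h]
    have hk : ∀ p ∈ cc.items, p.1 ≠ c := by
      intro p hp hpc
      have : c ∈ cc.keys := by
        simpa [PySem.Dict.keys, hpc] using List.mem_map_of_mem (f := (·.1)) hp
      exact h ((PySem.Dict.contains_iff_mem_keys cc c).2 this)
    have hany : (cc.items.any fun p => p.1 == c) = false := by
      simp only [List.any_eq_false]
      intro p hp; simpa using hk p hp
    have hfind : List.find? (fun p => p.1 == c) cc.items = none := by
      rw [List.find?_eq_none]; intro p hp; simpa using hk p hp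
    have hmap : ∀ w : List String,
        List.map (fun p => if p.1 = c then (c, w) else p) cc.items = cc.items := by
      intro w
      apply List.map_congr_left ?_ |>.trans (List.map_id _)
      intro p hp; simp [hk p hp]
    simp [PySem.Dict.modify, PySem.Dict.insert, PySem.Dict.contains, PySem.Dict.getD,
      PySem.Dict.get?, hany, hfind, hmap, List.find?_append]

-- PySem.Set.add folds: skipping values already seen
theorem ccdFoldlAddFilter (x : Int) (l acc : List Int) (hx : x ∈ acc) :
    l.foldl PySem.Set.add acc = (l.filter (fun y => !(y == x))).foldl PySem.Set.add acc := by
  induction l generalizing acc with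
  | nil => rfl
  | cons y ys ih =>
    by_cases hyx : y = x
    · subst hyx
      simp [PySem.Set.add, PySem.Set.contains, hx, ih acc hx]
    · have hb : (y == x) = false := by simp [hyx]
      simp only [List.filter_cons, hb, List.foldl_cons, Bool.not_false, if_pos]
      exact ih _ (by simp [PySem.Set.mem_add, hx])

theorem ccdFoldlAddConsOut (x : Int) (l s : List Int) (hx : x ∉ l) :
    l.foldl PySem.Set.add ([x] ++ s) = [x] ++ l.foldl PySem.Set.add s := by
  induction l generalizing s with
  | nil => rfl
  | cons y ys ih =>
    have hyx : y ≠ x := fun h => hx (h ▸ List.mem_cons_self)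
    have hadd : PySem.Set.add ([x] ++ s) y = [x] ++ PySem.Set.add s y := by
      simp [PySem.Set.add, PySem.Set.contains, hyx]
      split_ifs <;> simp
    rw [List.foldl_cons, hadd, List.foldl_cons,
      ih _ (fun h => hx (List.mem_cons_of_mem _ h))]

theorem ccdDedupSublist (l : List Int) : (PySem.List.dedup l).Sublist l := by
  rw [PySem.List.dedup_eq_ofList, PySem.Set.ofList_eq_foldl]
  have key : ∀ (l acc : List Int), (l.foldl PySem.Set.add acc).Sublist (acc ++ l) := by
    intro l
    induction l with
    | nil => simp
    | cons y ys ih =>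
      intro acc
      refine (ih (PySem.Set.add acc y)).trans ?_
      have : (PySem.Set.add acc y).Sublist (acc ++ [y]) := by
        simp only [PySem.Set.add]; split_ifs <;> simp
      simpa using this.append_right ys
  simpa using key l []

-- run-length collapse of a sorted list = (distinct values, multiplicities)
theorem ccdRunsEq (s : List Int) (hs : s.Pairwise (· ≤ ·)) :
    ccdRunLengths s = (PySem.List.dedup s).map (fun c => (c, (s.count c : Int))) := by
  fun_induction ccdRunLengths s with
  | case1 => simp [PySem.List.dedup]
  | case2 x xs ih =>
    set t := xs.takeWhile (· == x) with htdef
    set d := xs.dropWhile (· == x) with hddef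
    have hxs : xs = t ++ d := (List.takeWhile_append_dropWhile).symm
    have ht : ∀ y ∈ t, y = x := by
      intro y hy; simpa using List.mem_takeWhile_imp hy
    have hd_pw : d.Pairwise (· ≤ ·) :=
      hs.sublist ((List.dropWhile_sublist _).trans (List.sublist_cons_self x xs))
    have hxd : x ∉ d := by
      intro hmem
      cases hd : d with
      | nil => simp [hd] at hmem
      | cons h r =>
        have hh : ¬ ((h == x) = true) := by
          have := List.head?_dropWhile_not (· == x) xs
          rw [← hddef, hd] at this
          simpa using this
        have hhx : h ≠ x := by simpa using hh
        have hdsub : d.Sublist xs := hddef ▸ List.dropWhile_sublist _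
        have hxle : x ≤ h := by
          have : h ∈ xs := hdsub.subset (hd ▸ List.mem_cons_self)
          exact (List.pairwise_cons.1 hs).1 h this
        have hxlt : x < h := lt_of_le_of_ne hxle (Ne.symm hhx)
        rw [hd] at hmem
        rcases List.mem_cons.1 hmem with rfl | hmem'
        · exact absurd rfl hhx.symm
        · have : h ≤ x := (List.pairwise_cons.1 (hd ▸ hd_pw)).1 x hmem'
          omega
    have hded : PySem.List.dedup (x :: xs) = x :: PySem.List.dedup d := by
      rw [PySem.List.dedup_eq_ofList, PySem.Set.ofList_eq_foldl,
        PySem.List.dedup_eq_ofList, PySem.Set.ofList_eq_foldl]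
      have h1 : ((x :: xs).foldl PySem.Set.add []) = xs.foldl PySem.Set.add [x] := by
        simp [PySem.Set.add, PySem.Set.contains]
      rw [h1, hxs, List.foldl_append]
      have h2 : t.foldl PySem.Set.add [x] = [x] := by
        rw [ccdFoldlAddFilter x t [x] (by simp)]
        have : t.filter (fun y => !(y == x)) = [] := by
          rw [List.filter_eq_nil_iff]
          intro y hy; simp [ht y hy]
        rw [this]; rfl
      rw [h2]
      simpa using ccdFoldlAddConsOut x d [] hxd
    have hcx : (x :: xs).count x = t.length + 1 := by
      have hdx : d.count x = 0 := List.count_eq_zero.2 hxd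
      have htx : t.count x = t.length := List.count_eq_length.2 (fun b hb => (ht b hb).symm)
      rw [List.count_cons_self, hxs, List.count_append, htx, hdx]
    have hcd : ∀ c ∈ PySem.List.dedup d, (x :: xs).count c = d.count c := by
      intro c hc
      have hcd' : c ∈ d := (PySem.List.mem_dedup d c).1 hc
      have hcx' : c ≠ x := fun h => hxd (h ▸ hcd')
      have hct : t.count c = 0 := List.count_eq_zero.2 (fun h => hcx' (ht c h))
      rw [hxs, List.count_cons, List.count_append, hct,
        if_neg (by exact fun h => hcx' ((beq_iff_eq).1 h).symm)]
      omega
    rw [ih hd_pw, hded, List.map_cons]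
    refine congrArg₂ List.cons ?_ ?_
    · rw [hcx]; push_cast; ring
    · exact (List.map_congr_left (fun c hc => by rw [hcd c hc])).symm

-- A's result, characterized: sorted distinct counts paired with their multiplicities
theorem ccdA_eq (sc : List (String × List String)) (hpre : (sc.map Prod.fst).Nodup) :
    commentCountDistribution sc
      = (PySem.List.sorted (PySem.List.dedup (sc.map (fun kv => (kv.2.length : Int)))) (fun x => x) false).map
          (fun c => (c, ((sc.map (fun kv => (kv.2.length : Int))).count c : Int))) := by
  simp only [commentCountDistribution]
  have hfold :
      sc.foldl (fun cc user =>
        let count : Int := ((((PySem.Dict.mk sc).get? user.1).getD []).length : Int)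
        let cc := if cc.contains count = false then cc.insert count [] else cc
        cc.modify count [] (fun l => l ++ [user.1])) PySem.Dict.empty
      = (sc.map (fun kv => (((kv.2.length : Int)), kv.1))).foldl
          (fun d p => d.modify p.1 [] (· ++ [p.2])) PySem.Dict.empty := by
    rw [List.foldl_map]
    apply PySem.List.foldl_congr_mem
    intro acc kv hkv
    have hget : (PySem.Dict.mk sc).get? kv.1 = some kv.2 :=
      PySem.Dict.get?_of_mem_items (PySem.Dict.mk sc) (by simpa using hkv)
        (by simpa [PySem.Dict.keys] using hpre)
    simp only [hget, Option.getD_some]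
    exact ccdStepCollapse acc ((kv.2.length : Int)) kv.1
  rw [hfold]
  have hkeys :
      ((sc.map (fun kv => (((kv.2.length : Int)), kv.1))).foldl
          (fun d p => d.modify p.1 [] (· ++ [p.2])) PySem.Dict.empty).keys
        = PySem.List.dedup (sc.map (fun kv => (kv.2.length : Int))) := by
    rw [PySem.Dict.keys_foldl_modify_key (sc.map (fun kv => (((kv.2.length : Int)), kv.1)))
      (fun p => p.1) [] (fun _ p => (fun l => l ++ [p.2])) PySem.Dict.empty]
    simp [PySem.Set.update, PySem.List.dedup_eq_ofList, PySem.Set.ofList_eq_foldl,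
      List.map_map, Function.comp_def]
  have hlen : ∀ c : Int,
      ((((sc.map (fun kv => (((kv.2.length : Int)), kv.1))).foldl
          (fun d p => d.modify p.1 [] (· ++ [p.2])) PySem.Dict.empty).getD c []).length : Int)
        = ((sc.map (fun kv => (kv.2.length : Int))).count c : Int) := by
    intro c
    rw [PySem.Dict.getD_foldl_modify_append]
    simp only [PySem.Dict.getD_empty, List.nil_append]
    congr 1
    rw [List.length_map, ← List.countP_eq_length_filter, List.countP_map, List.count, List.countP_map]
    simp [Function.comp_def, BEq.comm]
  have hnodupkeys :
      (PySem.List.sorted ((sc.map (fun kv => (((kv.2.length : Int)), kv.1))).foldl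
          (fun d p => d.modify p.1 [] (· ++ [p.2])) PySem.Dict.empty).keys (fun x => x) false).Nodup := by
    refine ((PySem.List.sorted_perm _ (fun x : Int => x) false).symm).nodup ?_
    rw [hkeys]; exact PySem.List.nodup_dedup _
  have hitems := PySem.Dict.items_foldl_insert_fresh
    (l := PySem.List.sorted ((sc.map (fun kv => (((kv.2.length : Int)), kv.1))).foldl
          (fun d p => d.modify p.1 [] (· ++ [p.2])) PySem.Dict.empty).keys (fun x => x) false)
    (k := fun a => a)
    (v := fun c => ((((sc.map (fun kv => (((kv.2.length : Int)), kv.1))).foldl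
          (fun d p => d.modify p.1 [] (· ++ [p.2])) PySem.Dict.empty).getD c []).length : Int))
    (d := PySem.Dict.empty)
    (by intro a _; simp) (by simpa using hnodupkeys)
  simp only [show (PySem.Dict.empty : PySem.Dict Int Int).items = [] from rfl,
    List.nil_append] at hitems
  rw [hitems, hkeys]
  exact List.map_congr_left (fun c _ => by rw [hlen c])

-- ===== VERDICT (by name: the statement is the Claim_ definition above) =====
theorem commentCountDistribution_spec : Claim_equal_commentCountDistribution := by
  intro sc _ hpre
  unfold Spec_commentCountDistribution commentCountDistribution_alt
  unfold Pre_commentCountDistribution at hpre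
  rw [ccdA_eq sc hpre,
    ccdRunsEq _ (by simpa using PySem.List.sorted_pairwise (sc.map (fun kv => (kv.2.length : Int))) (fun x => x))]
  have hperm : (PySem.List.dedup (PySem.List.sorted (sc.map (fun kv => (kv.2.length : Int))) (fun x => x) false)).Perm
      (PySem.List.dedup (sc.map (fun kv => (kv.2.length : Int)))) := by
    refine (List.perm_ext_iff_of_nodup (PySem.List.nodup_dedup _) (PySem.List.nodup_dedup _)).2 ?_
    intro a
    simp [PySem.List.mem_sorted]
  have hlt : (PySem.List.dedup (PySem.List.sorted (sc.map (fun kv => (kv.2.length : Int))) (fun x => x) false)).Pairwise (· < ·) := by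
    have hle := (PySem.List.sorted_pairwise (sc.map (fun kv => (kv.2.length : Int))) (fun x => x)).sublist
      (ccdDedupSublist _)
    have hne : (PySem.List.dedup (PySem.List.sorted (sc.map (fun kv => (kv.2.length : Int))) (fun x => x) false)).Pairwise (· ≠ ·) :=
      PySem.List.nodup_dedup _
    exact (hle.and hne).imp (fun h => lt_of_le_of_ne h.1 h.2)
  rw [PySem.List.sorted_eq_of_perm_of_pairwise_lt _ _ _ hperm hlt]
  refine (List.map_congr_left ?_).symm
  intro c _
  rw [(PySem.List.sorted_perm (sc.map (fun kv => (kv.2.length : Int))) (fun x => x) false).count_eq c]
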